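-- pv_equiv track=rewrite | github.com/yuvaraj949/Drone_Openenv | app.py | _bfs_next_zone
-- ===== SOURCE A (Python) =====
-- from collections import deque, defaultdict
--
-- def _bfs_next_zone(current, destination, graph, blocked_zones=None):
--     blocked = set(blocked_zones or [])
--     if current == destination:
--         return current
--     queue = deque([(current, [current])])
--     visited = {current}
--     while queue:
--         zone, path = queue.popleft()
--         for nb in graph.get(zone, []):
--             if nb in visited or nb in blocked:
--                 continue
--             new_path = path + [nb]
--             if nb == destination:
--                 return new_path[1] if len(new_path) > 1 else current
--             visited.add(nb)
--             queue.append((nb, new_path))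
--     return current
-- ===== SOURCE B (Python) =====
-- def _bfs_next_zone(current, destination, graph, blocked_zones=None):
--     # Level-synchronous BFS: the frontier holds (zone, first_hop) pairs, so no
--     # per-entry path copying and no deque/dict are needed.
--     blocked = set(blocked_zones or [])
--     if current == destination:
--         return current
--     visited = {current}
--     frontier = [(current, current)]
--     while frontier:
--         nxt = []
--         for zone, hop in frontier:
--             for nb in graph.get(zone, []):
--                 if nb in visited or nb in blocked:
--                     continue
--                 nb_hop = nb if zone == current else hop
--                 if nb == destination:
--                     return nb_hop
--                 visited.add(nb)
--                 nxt.append((nb, nb_hop))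
--         frontier = nxt
--     return current
-- ===== Notes on version B (the rewrite author's own statement) =====
-- stated objective: alternative
-- what changed: Replaces A's deque of (zone, full-path-list) entries by a level-synchronous BFS whose frontier holds (zone, first_hop) pairs, so no path list is ever copied and no deque is needed; same discovery order and tie-breaking.
import Mathlib
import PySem

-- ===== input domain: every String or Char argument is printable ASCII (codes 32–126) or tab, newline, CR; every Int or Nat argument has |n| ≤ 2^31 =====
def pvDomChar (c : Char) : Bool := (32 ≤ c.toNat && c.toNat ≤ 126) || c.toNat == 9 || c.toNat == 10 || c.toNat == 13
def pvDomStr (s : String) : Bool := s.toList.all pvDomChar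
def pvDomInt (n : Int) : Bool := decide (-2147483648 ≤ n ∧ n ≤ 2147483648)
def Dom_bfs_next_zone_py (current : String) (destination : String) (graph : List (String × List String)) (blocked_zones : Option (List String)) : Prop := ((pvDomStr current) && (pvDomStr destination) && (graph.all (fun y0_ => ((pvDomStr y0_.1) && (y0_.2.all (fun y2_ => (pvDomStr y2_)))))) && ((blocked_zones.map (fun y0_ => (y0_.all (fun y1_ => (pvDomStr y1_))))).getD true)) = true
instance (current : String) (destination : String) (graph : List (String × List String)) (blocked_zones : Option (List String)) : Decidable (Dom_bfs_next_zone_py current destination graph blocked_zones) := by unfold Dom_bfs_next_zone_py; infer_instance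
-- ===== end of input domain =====

-- ===== PORT A =====
-- B replaces A's FIFO queue of (zone, full-path-list) entries by a level-synchronous BFS over
-- (zone, first_hop) pairs (same discovery order, no path copying); return-value equivalence only.
-- A's while-loop: queue of (zone, path) pairs; inner for-loop over graph.get(zone, []) with early return.
def pyA_inner (current destination : String) (blocked : PySem.Set String) (path : List String) :
    List String → List (String × List String) → PySem.Set String →
    String ⊕ (List (String × List String) × PySem.Set String)
  | [], queue, visited => .inr (queue, visited)
  | nb :: rest, queue, visited =>
    if visited.contains nb || blocked.contains nb then
      pyA_inner current destination blocked path rest queue visited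
    else
      let new_path := path ++ [nb]
      if nb == destination then
        .inl (if 1 < new_path.length then PySem.List.pyGetD new_path 1 current else current)
      else
        pyA_inner current destination blocked path rest
          (queue ++ [(nb, new_path)]) (visited.add nb)

def pyA_loop (current destination : String) (graph : PySem.Dict String (List String))
    (blocked : PySem.Set String) :
    Nat → List (String × List String) → PySem.Set String → String
  | 0, _, _ => current                               -- fuel guard only; never reached (see fuel comment)
  | _ + 1, [], _ => current
  | fuel + 1, (zone, path) :: rest, visited =>
    match pyA_inner current destination blocked path (graph.getD zone []) rest visited with
    | .inl r => r
    | .inr (q, v) => pyA_loop current destination graph blocked fuel q v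

def bfs_next_zone_py (current : String) (destination : String) (graph : List (String × List String)) (blocked_zones : Option (List String)) : String :=
  let blocked := PySem.Set.ofList (blocked_zones.getD [])
  if current == destination then current
  else
    -- fuel = 1 + total adjacency-list length bounds the number of while-iterations
    -- (every enqueue after the first is a fresh node produced by one adjacency entry),
    -- so the fuel guard is never the reason the loop stops: a pure totality device.
    pyA_loop current destination (PySem.Dict.mk graph) blocked
      (1 + (graph.map (fun p => p.2.length)).sum)
      [(current, [current])] (PySem.Set.ofList [current])

-- ===== PORT B =====
-- B's body of the nested 'for zone, hop in frontier / for nb in …' loops, with Python's early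
-- return as a short-circuiting Sum accumulator.
def pyB_step (current destination : String) (blocked : PySem.Set String) (zone hop : String)
    (acc : String ⊕ (List (String × String) × PySem.Set String)) (nb : String) :
    String ⊕ (List (String × String) × PySem.Set String) :=
  match acc with
  | .inl r => .inl r
  | .inr (nxt, visited) =>
    if visited.contains nb || blocked.contains nb then .inr (nxt, visited)
    else
      let nb_hop := if zone == current then nb else hop
      if nb == destination then .inl nb_hop
      else .inr (nxt ++ [(nb, nb_hop)], visited.add nb)

def pyB_scan (current destination : String) (blocked : PySem.Set String) (zone hop : String)
    (nbrs : List String) (nxt : List (String × String)) (visited : PySem.Set String) :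
    String ⊕ (List (String × String) × PySem.Set String) :=
  nbrs.foldl (pyB_step current destination blocked zone hop) (.inr (nxt, visited))

-- The flattened while/for state machine: (remaining frontier, nxt being built, visited);
-- when the frontier is exhausted, 'frontier = nxt' happens in the same step (eager swap).
def pyB_loop (current destination : String) (graph : PySem.Dict String (List String))
    (blocked : PySem.Set String) :
    Nat → List (String × String) → List (String × String) → PySem.Set String → String
  | 0, _, _, _ => current                            -- fuel guard only; never reached
  | _ + 1, [], _, _ => current                       -- 'while frontier:' exit
  | fuel + 1, (zone, hop) :: rest, nxt, visited =>
    match pyB_scan current destination blocked zone hop (graph.getD zone []) nxt visited with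
    | .inl r => r
    | .inr (nxt', visited') =>
      match rest with
      | [] => pyB_loop current destination graph blocked fuel nxt' [] visited'   -- frontier = nxt
      | _ => pyB_loop current destination graph blocked fuel rest nxt' visited'

def bfs_next_zone_py_alt (current : String) (destination : String) (graph : List (String × List String)) (blocked_zones : Option (List String)) : String :=
  let blocked := PySem.Set.ofList (blocked_zones.getD [])
  if current == destination then current
  else
    pyB_loop current destination (PySem.Dict.mk graph) blocked
      (1 + (graph.map (fun p => p.2.length)).sum)
      [(current, current)] [] (PySem.Set.ofList [current])

-- ===== PRECONDITION & SPEC =====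
def Spec_bfs_next_zone_py (current : String) (destination : String) (graph : List (String × List String)) (blocked_zones : Option (List String)) (out : String) : Prop := out = bfs_next_zone_py_alt current destination graph blocked_zones
instance (current : String) (destination : String) (graph : List (String × List String)) (blocked_zones : Option (List String)) (out : String) : Decidable (Spec_bfs_next_zone_py current destination graph blocked_zones out) := by unfold Spec_bfs_next_zone_py; infer_instance

-- ===== CLAIM (what is proved, stated in full; the proofs are below) =====
def Claim_equal_bfs_next_zone_py : Prop := ∀ (current : String) (destination : String) (graph : List (String × List String)) (blocked_zones : Option (List String)), Dom_bfs_next_zone_py current destination graph blocked_zones → Spec_bfs_next_zone_py current destination graph blocked_zones (bfs_next_zone_py current destination graph blocked_zones)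

-- ===== LEMMAS AND PROOFS =====

-- A queue entry (z, p) of A corresponds in B to the frontier pair (z, second element of p).
def pvHop (current : String) (p : List String) : String :=
  match p with
  | _ :: h :: _ => h
  | _ => current

def pvPair (current : String) (e : String × List String) : String × String :=
  (e.1, pvHop current e.2)

-- Shape invariant for A's queue entries: the initial entry, or a path of length ≥ 2 whose
-- second element is the first hop.
def EntryOK (current : String) (e : String × List String) : Prop :=
  (e.1 = current ∧ e.2 = [current]) ∨ (e.1 ≠ current ∧ ∃ x h t, e.2 = x :: h :: t)

lemma set_contains_add {s : PySem.Set String} {x z : String} :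
    (s.add x).contains z = (s.contains z || z == x) := by
  by_cases hz : z = x
  · subst hz
    by_cases hx : z ∈ s <;> simp [PySem.Set.add, PySem.Set.contains, hx]
  · by_cases hx : x ∈ s <;> simp [PySem.Set.add, PySem.Set.contains, hx, hz]

lemma pyB_foldl_inl (current destination : String) (blocked : PySem.Set String)
    (zone hop r : String) (l : List String) :
    l.foldl (pyB_step current destination blocked zone hop) (.inl r) = .inl r := by
  induction l with
  | nil => rfl
  | cons nb rest ih => simpa [List.foldl, pyB_step] using ih

lemma inner_sim (current destination : String) (blocked : PySem.Set String)
    (zone : String) (path : List String)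
    (hentry : EntryOK current (zone, path)) :
    ∀ (nbrs : List String) (qa : List (String × List String))
      (R nxt : List (String × String)) (vis : PySem.Set String),
      qa.map (pvPair current) = R ++ nxt →
      vis.contains current = true →
      (∀ e ∈ qa, EntryOK current e) →
      ((∃ r, pyA_inner current destination blocked path nbrs qa vis = .inl r ∧
             pyB_scan current destination blocked zone (pvHop current path) nbrs nxt vis = .inl r) ∨
       (∃ qa' nxt' vis',
             pyA_inner current destination blocked path nbrs qa vis = .inr (qa', vis') ∧
             pyB_scan current destination blocked zone (pvHop current path) nbrs nxt vis = .inr (nxt', vis') ∧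
             qa'.map (pvPair current) = R ++ nxt' ∧ vis'.contains current = true ∧
             (∀ e ∈ qa', EntryOK current e))) := by
  intro nbrs
  induction nbrs with
  | nil =>
    intro qa R nxt vis hmap hc he
    exact Or.inr ⟨qa, nxt, vis, rfl, rfl, hmap, hc, he⟩
  | cons nb rest ih =>
    intro qa R nxt vis hmap hc he
    simp only [pyA_inner, pyB_scan, List.foldl, pyB_step]
    cases hvis : (vis.contains nb || blocked.contains nb) with
    | true =>
      simp only [if_true]
      exact ih qa R nxt vis hmap hc he
    | false =>
      simp only [Bool.false_eq_true, if_false]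
      have hvnb : vis.contains nb = false := (Bool.or_eq_false_iff.mp hvis).1
      have hnbc : nb ≠ current := by
        intro h; rw [h, hc] at hvnb; exact Bool.true_eq_false.mp hvnb
      cases hd : (nb == destination) with
      | true =>
        simp only [if_true]
        refine Or.inl ⟨_, rfl, ?_⟩
        rw [pyB_foldl_inl]
        rcases hentry with ⟨hz, hp⟩ | ⟨hz, x, h, t, hp⟩
        · subst hp
          have hz' : zone = current := hz
          have hzc : (zone == current) = true := by simp [hz']
          simp [hzc, PySem.List.pyGetD, PySem.List.pyGet?, PySem.List.pyIdx?]
        · subst hp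
          have hz' : zone ≠ current := hz
          have hzc : (zone == current) = false := by simp [hz']
          have hle : (0:Int) ≤ (t.length:Int) + 1 := by positivity
          simp [hzc, hle, pvHop, PySem.List.pyGetD, PySem.List.pyGet?, PySem.List.pyIdx?]
      | false =>
        simp only [Bool.false_eq_true, if_false]
        have hpair : pvPair current (nb, path ++ [nb]) =
            (nb, if (zone == current) = true then nb else pvHop current path) := by
          rcases hentry with ⟨hz, hp⟩ | ⟨hz, x, h, t, hp⟩
          · subst hp
            have hz' : zone = current := hz
            have hzc : (zone == current) = true := by simp [hz']
            simp [pvPair, pvHop, hzc]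
          · subst hp
            have hz' : zone ≠ current := hz
            have hzc : (zone == current) = false := by simp [hz']
            simp [pvPair, pvHop, hzc]
        have hmap' : (qa ++ [(nb, path ++ [nb])]).map (pvPair current) =
            R ++ (nxt ++ [(nb, if (zone == current) = true then nb else pvHop current path)]) := by
          simp [hmap, hpair]
        refine ?_
        have := ih (qa ++ [(nb, path ++ [nb])]) R
            (nxt ++ [(nb, if (zone == current) = true then nb else pvHop current path)])
            (vis.add nb) hmap'
            (by rw [set_contains_add, hc, Bool.true_or])
            (by
              intro e hmem
              rcases List.mem_append.mp hmem with hm | hm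
              · exact he e hm
              · simp only [List.mem_singleton] at hm
                subst hm
                rcases hentry with ⟨hz, hp⟩ | ⟨hz, x, h, t, hp⟩
                · subst hp; exact Or.inr ⟨hnbc, current, nb, [], rfl⟩
                · subst hp; exact Or.inr ⟨hnbc, x, h, t ++ [nb], rfl⟩)
        -- align the conditional hop literal with B's 'if zone == current then nb else hop'
        by_cases hzc : (zone == current) = true <;> simpa [hzc] using this

lemma loop_sim (current destination : String) (graph : PySem.Dict String (List String))
    (blocked : PySem.Set String) :
    ∀ (fuel : Nat) (qa : List (String × List String)) (frontier nxt : List (String × String))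
      (vis : PySem.Set String),
      qa.map (pvPair current) = frontier ++ nxt →
      (frontier = [] → nxt = []) →
      vis.contains current = true →
      (∀ e ∈ qa, EntryOK current e) →
      pyA_loop current destination graph blocked fuel qa vis =
      pyB_loop current destination graph blocked fuel frontier nxt vis := by
  intro fuel
  induction fuel with
  | zero => intro qa frontier nxt vis _ _ _ _; simp [pyA_loop, pyB_loop]
  | succ f ih =>
    intro qa frontier nxt vis hmap hfe hc he
    match qa, hmap with
    | [], hmap =>
      have h1 : frontier = [] := by
        cases frontier with
        | nil => rfl
        | cons a l => simp at hmap
      subst h1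
      simp [pyA_loop, pyB_loop]
    | (z, p) :: qrest, hmap =>
      match frontier, hfe, hmap with
      | [], hfe, hmap =>
        rw [hfe rfl] at hmap; simp at hmap
      | fp :: frest, _, hmap =>
        simp only [List.map_cons, List.cons_append, List.cons.injEq] at hmap
        obtain ⟨hfp, hmaprest⟩ := hmap
        subst hfp
        simp only [pvPair, pyA_loop, pyB_loop]
        rcases inner_sim current destination blocked z p (he (z, p) List.mem_cons_self)
            (graph.getD z []) qrest frest nxt vis hmaprest hc
            (fun e hm => he e (List.mem_cons_of_mem _ hm)) with
          ⟨r, hA, hB⟩ | ⟨qa', nxt', vis', hA, hB, hmap', hc', he'⟩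
        · rw [hA, hB]
        · rw [hA, hB]
          cases frest with
          | nil =>
            exact ih qa' nxt' [] vis' (by simpa using hmap') (fun _ => rfl) hc' he'
          | cons w ws =>
            exact ih qa' (w :: ws) nxt' vis' hmap' (by intro h; cases h) hc' he'

-- ===== VERDICT (by name: the statement is the Claim_ definition above) =====
theorem bfs_next_zone_py_spec : Claim_equal_bfs_next_zone_py := by
  intro current destination graph blocked_zones _
  unfold Spec_bfs_next_zone_py bfs_next_zone_py bfs_next_zone_py_alt
  cases hb : (current == destination) with
  | true => simp
  | false =>
    simp only [Bool.false_eq_true, if_false]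
    apply loop_sim
    · simp [pvPair, pvHop]
    · intro h; cases h
    · simp [PySem.Set.ofList, PySem.Set.contains, PySem.Set.add]
    · intro e hm
      simp only [List.mem_singleton] at hm
      subst hm
      exact Or.inl ⟨rfl, rfl⟩
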